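-- pv_equiv track=rewrite | github.com/Elanthingal/interview-coding-problems | mettl-problem.py | check
-- ===== SOURCE A (Python) =====
-- def prevPassword(intern=4, days=5):
--
--     password = 0
--
--     for i in range(days):
--         if i == 0:
--             password += 5000 * intern
--         else:
--             password += 5000 + i
--     return password
--
-- def check(interns, passwords):
--
--     for day in range(49):
--         for intern in range(interns):
--             if(day == 0 and (intern * 5000) == passwords):
--                 return intern
--             else:
--                 if(prevPassword(intern , day + 1) == passwords):
--                     return intern
-- ===== SOURCE B (Python) =====
-- def check(interns, passwords):
--     # Invert the password formula per day: password(intern, day) =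
--     # 5000*intern + 5000*day + day*(day+1)//2, solved directly for intern.
--     for day in range(49):
--         r = passwords - 5000 * day - day * (day + 1) // 2
--         if r >= 0 and r % 5000 == 0 and r // 5000 < interns:
--             return r // 5000
-- ===== Notes on version B (the rewrite author's own statement) =====
-- stated objective: faster
-- what changed: Instead of scanning every intern for each of the 49 days and recomputing prevPassword by a loop, B inverts the closed-form password formula per day and solves for the intern directly, so the scan over interns disappears.
import Mathlib
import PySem

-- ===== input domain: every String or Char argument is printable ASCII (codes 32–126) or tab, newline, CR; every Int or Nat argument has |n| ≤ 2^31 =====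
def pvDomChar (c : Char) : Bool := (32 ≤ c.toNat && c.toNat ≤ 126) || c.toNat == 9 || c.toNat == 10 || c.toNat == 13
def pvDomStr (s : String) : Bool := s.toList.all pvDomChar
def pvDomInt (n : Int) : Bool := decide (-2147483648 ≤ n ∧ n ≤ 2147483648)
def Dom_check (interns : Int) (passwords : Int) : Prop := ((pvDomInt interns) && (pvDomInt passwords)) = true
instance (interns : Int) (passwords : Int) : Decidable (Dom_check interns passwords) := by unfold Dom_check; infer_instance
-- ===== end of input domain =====

-- B replaces the per-day scan over all interns by solving the closed-form password
-- formula for the intern directly (objective: faster — the loop over interns disappears).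

-- ===== PORT A =====
-- prevPassword(intern, days): loop over range(days) accumulating password
def prevPassword (intern : Int) (days : Int) : Int :=
  (PySem.List.pyRange 0 days 1).foldl
    (fun password i => if i = 0 then password + 5000 * intern else password + (5000 + i)) 0

-- inner 'for intern in range(interns)' loop with its early returns
def checkInner (passwords : Int) (day : Int) : List Int → Option Int
  | [] => none
  | intern :: rest =>
      if day = 0 ∧ intern * 5000 = passwords then some intern
      else if prevPassword intern (day + 1) = passwords then some intern
      else checkInner passwords day rest

-- outer 'for day in range(49)' loop
def checkOuter (interns : Int) (passwords : Int) : List Int → Option Int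
  | [] => none
  | day :: rest =>
      match checkInner passwords day (PySem.List.pyRange 0 interns 1) with
      | some i => some i
      | none => checkOuter interns passwords rest

def check (interns : Int) (passwords : Int) : Option Int :=
  checkOuter interns passwords (PySem.List.pyRange 0 49 1)

-- ===== PORT B =====
def checkAltLoop (interns : Int) (passwords : Int) : List Int → Option Int
  | [] => none
  | day :: rest =>
      let r := passwords - 5000 * day - PySem.Int.floordiv (day * (day + 1)) 2
      if 0 ≤ r ∧ PySem.Int.mod r 5000 = 0 ∧ PySem.Int.floordiv r 5000 < interns then
        some (PySem.Int.floordiv r 5000)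
      else checkAltLoop interns passwords rest

def check_alt (interns : Int) (passwords : Int) : Option Int :=
  checkAltLoop interns passwords (PySem.List.pyRange 0 49 1)

-- ===== PRECONDITION & SPEC =====
def Spec_check (interns : Int) (passwords : Int) (out : Option Int) : Prop := out = check_alt interns passwords
instance (interns : Int) (passwords : Int) (out : Option Int) : Decidable (Spec_check interns passwords out) := by unfold Spec_check; infer_instance

-- ===== CLAIM (what is proved, stated in full; the proofs are below) =====
def Claim_equal_check : Prop := ∀ (interns : Int) (passwords : Int), Dom_check interns passwords → Spec_check interns passwords (check interns passwords)

-- ===== LEMMAS AND PROOFS =====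

lemma tri_succ (n : Nat) : (n+1)*(n+1+1)/2 = n*(n+1)/2 + (n+1) := by
  obtain ⟨k, hk⟩ := Nat.even_mul_succ_self n
  have h : (n+1)*(n+1+1) = n*(n+1) + 2*(n+1) := by ring
  omega

lemma prevPassword_formula (intern : Int) (n : Nat) :
    prevPassword intern ((n : Int) + 1) = 5000 * intern + 5000 * n + ((n*(n+1)/2 : Nat) : Int) := by
  induction n with
  | zero =>
      simp [prevPassword, show PySem.List.pyRange 0 1 1 = [0] from rfl]
  | succ m ih =>
      have hb : (0:Int) ≤ (m : Int) + 1 := by positivity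
      have hsplit : PySem.List.pyRange 0 (((m:Nat)+1 : Nat) + 1 : Int) 1
          = PySem.List.pyRange 0 ((m:Int)+1) 1 ++ [(m:Int)+1] := by
        have := PySem.List.pyRange_one_succ_right (a := 0) (b := (m:Int)+1) hb
        push_cast
        convert this using 2
      unfold prevPassword at ih ⊢
      rw [hsplit, List.foldl_append, ih]
      have hne : ¬ ((m:Int)+1 = 0) := by omega
      simp only [List.foldl_cons, List.foldl_nil, if_neg hne]
      rw [tri_succ m]
      push_cast
      ring

-- the inner scan is a first-match search for 5000*i = r
lemma checkInner_eq_find (passwords d r : Int)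
    (h : ∀ i : Int, ((d = 0 ∧ i * 5000 = passwords) ∨ prevPassword i (d+1) = passwords) ↔ 5000 * i = r) :
    ∀ L : List Int, checkInner passwords d L = L.find? (fun i => decide (5000 * i = r))
  | [] => rfl
  | i :: rest => by
      by_cases h1 : d = 0 ∧ i * 5000 = passwords
      · have hp : 5000 * i = r := (h i).mp (Or.inl h1)
        simp [checkInner, h1, hp]
      · by_cases h2 : prevPassword i (d+1) = passwords
        · have hp : 5000 * i = r := (h i).mp (Or.inr h2)
          simp [checkInner, h1, h2, hp]
        · have hp : ¬ (5000 * i = r) := fun hr => h2 (((h i).mpr hr).elim (fun c => absurd c h1) id)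
          simp [checkInner, h1, h2, hp, checkInner_eq_find passwords d r h rest]

-- first match of 5000*i = r in range(a, b) in closed form
lemma find_range (r : Int) : ∀ (n : Nat) (a : Int),
    (PySem.List.pyRange a (a + n) 1).find? (fun i => decide (5000 * i = r))
      = if a * 5000 ≤ r ∧ r < (a + n) * 5000 ∧ PySem.Int.mod r 5000 = 0
        then some (PySem.Int.floordiv r 5000) else none
  | 0, a => by
      rw [PySem.List.pyRange_one_eq_nil (by omega)]
      simp only [List.find?_nil]
      rw [if_neg]
      push_cast
      omega
  | (n+1), a => by
      rw [PySem.List.pyRange_one_cons (by push_cast; omega)]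
      by_cases hp : 5000 * a = r
      · have hdvd : PySem.Int.mod r 5000 = 0 :=
          (PySem.Int.mod_eq_zero_iff_dvd r 5000).mpr ⟨a, hp.symm⟩
        have hq : PySem.Int.floordiv r 5000 = a := by
          rw [PySem.Int.floordiv_eq_iff_of_pos (by norm_num)]
          omega
        rw [List.find?_cons_of_pos (by simpa using hp)]
        rw [if_pos ⟨by omega, by push_cast; nlinarith [hp], hdvd⟩, hq]
      · rw [List.find?_cons_of_neg (by simpa using hp)]
        have heq : a + (((n+1) : Nat) : Int) = (a+1) + n := by push_cast; ring
        rw [heq, find_range r n (a+1)]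
        by_cases hd : PySem.Int.mod r 5000 = 0
        · obtain ⟨k, hk⟩ := (PySem.Int.mod_eq_zero_iff_dvd r 5000).mp hd
          apply if_congr _ rfl rfl
          constructor
          · rintro ⟨h1, h2, -⟩
            refine ⟨?_, by omega, hd⟩
            have hka : a ≤ k := by omega
            have : a ≠ k := fun hak => hp (by omega)
            omega
          · rintro ⟨h1, h2, -⟩
            exact ⟨by omega, by omega, hd⟩
        · rw [if_neg (by tauto), if_neg (by tauto)]

-- per-day: the inner loop equals B's closed-form solve
lemma inner_closed (interns passwords : Int) (n : Nat) :
    checkInner passwords (n : Int) (PySem.List.pyRange 0 interns 1)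
      = (let r := passwords - 5000 * (n:Int) - PySem.Int.floordiv ((n:Int) * ((n:Int) + 1)) 2;
         if 0 ≤ r ∧ PySem.Int.mod r 5000 = 0 ∧ PySem.Int.floordiv r 5000 < interns then
           some (PySem.Int.floordiv r 5000) else none) := by
  have htri : PySem.Int.floordiv ((n:Int) * ((n:Int) + 1)) 2 = ((n*(n+1)/2 : Nat) : Int) := by
    have h1 : ((n:Int) * ((n:Int) + 1)) = ((n*(n+1) : Nat) : Int) := by push_cast; ring
    rw [h1]
    exact_mod_cast PySem.Int.floordiv_natCast (n*(n+1)) 2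
  set r := passwords - 5000 * (n:Int) - PySem.Int.floordiv ((n:Int) * ((n:Int) + 1)) 2 with hr
  have hcond : ∀ i : Int,
      (((n:Int) = 0 ∧ i * 5000 = passwords) ∨ prevPassword i ((n:Int)+1) = passwords) ↔ 5000 * i = r := by
    intro i
    rw [prevPassword_formula, hr, htri]
    constructor
    · rintro (⟨hn0, hi⟩ | hprev)
      · have hn : n = 0 := by exact_mod_cast hn0
        subst hn; simp at *; omega
      · omega
    · intro hir; right; omega
  rw [checkInner_eq_find passwords (n:Int) r hcond]
  by_cases hI : 0 < interns
  · have h0 : (0:Int) + interns.toNat = interns := by omega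
    have := find_range r interns.toNat 0
    rw [h0] at this
    rw [this]
    apply if_congr _ rfl rfl
    constructor
    · rintro ⟨h1, h2, h3⟩
      refine ⟨h1, h3, ?_⟩
      rw [PySem.Int.floordiv_lt_iff_lt_mul (by norm_num)]
      omega
    · rintro ⟨h1, h2, h3⟩
      rw [PySem.Int.floordiv_lt_iff_lt_mul (by norm_num)] at h3
      exact ⟨by omega, by omega, h2⟩
  · rw [PySem.List.pyRange_one_eq_nil (by omega)]
    simp only [List.find?_nil]
    rw [if_neg]
    intro ⟨h1, h2, h3⟩
    have := PySem.Int.floordiv_lt_iff_lt_mul (a := r) (b := 5000) (q := interns) (by norm_num) |>.mp h3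
    nlinarith

-- both outer loops agree on any list of nonnegative days
lemma outer_eq (interns passwords : Int) :
    ∀ L : List Int, (∀ d ∈ L, 0 ≤ d) →
      checkOuter interns passwords L = checkAltLoop interns passwords L
  | [], _ => rfl
  | d :: rest, h => by
      have hd : 0 ≤ d := h d (List.mem_cons_self ..)
      have hdn : d = (d.toNat : Int) := by omega
      have hrec := outer_eq interns passwords rest (fun x hx => h x (List.mem_cons_of_mem _ hx))
      rw [checkOuter, checkAltLoop, hdn, inner_closed interns passwords d.toNat]
      dsimp only
      split_ifs
      · rfl
      · exact hrec

-- ===== VERDICT (by name: the statement is the Claim_ definition above) =====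
theorem check_spec : Claim_equal_check := by
  intro interns passwords _
  unfold Spec_check check check_alt
  exact outer_eq interns passwords _ (fun d hd => ((PySem.List.mem_pyRange_one).mp hd).1)
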